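-- pv_equiv track=rewrite | github.com/Johnny-main/johnnyjod | data/pc.py | product_cipher_decrypt
-- ===== SOURCE A (Python) =====
-- def caesar_cipher(text, shift):
--     result = ""
--     for char in text:
--         if char.isalpha():
--             shift_base = 65 if char.isupper() else 97
--             result += chr((ord(char) - shift_base + shift) % 26 + shift_base)
--         else:
--             result += char
--     return result
--
-- def product_cipher_decrypt(ciphertext, caesar_shift, transposition_key):
--     # Reverse the transposition
--     key_indices = sorted(range(len(transposition_key)), key=lambda k: transposition_key[k])
--     num_cols = len(transposition_key)
--     num_rows = len(ciphertext) // num_cols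
--     remainder = len(ciphertext) % num_cols
--
--     columns = [''] * num_cols
--     start = 0
--
--     for index in key_indices:
--         length = num_rows + 1 if index < remainder else num_rows
--         columns[index] = ciphertext[start:start + length]
--         start += length
--
--     transposed_text = ''.join([columns[i % num_cols][i // num_cols] for i in range(len(ciphertext))])
--
--     # Reverse the substitution
--     decrypted_text = caesar_cipher(transposed_text, -caesar_shift)
--
--     return decrypted_text
-- ===== SOURCE B (Python) =====
-- def _shift_back(ch, shift):
--     if ch.isupper():
--         return chr((ord(ch) - 65 - shift) % 26 + 65)
--     if ch.islower():
--         return chr((ord(ch) - 97 - shift) % 26 + 97)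
--     return ch
--
-- def product_cipher_decrypt(ciphertext, caesar_shift, transposition_key):
--     # Single scatter pass: place each ciphertext character directly at its
--     # row-major destination (inverse permutation), decrypting it on the way.
--     num_cols = len(transposition_key)
--     num_rows = len(ciphertext) // num_cols
--     remainder = len(ciphertext) % num_cols
--     out = [''] * len(ciphertext)
--     start = 0
--     for index in sorted(range(num_cols), key=lambda k: transposition_key[k]):
--         length = num_rows + 1 if index < remainder else num_rows
--         for r in range(length):
--             out[r * num_cols + index] = _shift_back(ciphertext[start + r], caesar_shift)
--         start += length
--     return ''.join(out)
-- ===== Notes on version B (the rewrite author's own statement) =====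
-- stated objective: alternative
-- what changed: B replaces A's build-columns-then-gather pipeline (column strings assigned by set-index, a row-major gather comprehension, then a separate Caesar pass over the whole string) with a single scatter pass that writes each ciphertext character directly to its inverse-permutation destination r*num_cols+index, applying the Caesar decryption per character on the way, so neither the columns list nor the intermediate transposed string exists.
import Mathlib
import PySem

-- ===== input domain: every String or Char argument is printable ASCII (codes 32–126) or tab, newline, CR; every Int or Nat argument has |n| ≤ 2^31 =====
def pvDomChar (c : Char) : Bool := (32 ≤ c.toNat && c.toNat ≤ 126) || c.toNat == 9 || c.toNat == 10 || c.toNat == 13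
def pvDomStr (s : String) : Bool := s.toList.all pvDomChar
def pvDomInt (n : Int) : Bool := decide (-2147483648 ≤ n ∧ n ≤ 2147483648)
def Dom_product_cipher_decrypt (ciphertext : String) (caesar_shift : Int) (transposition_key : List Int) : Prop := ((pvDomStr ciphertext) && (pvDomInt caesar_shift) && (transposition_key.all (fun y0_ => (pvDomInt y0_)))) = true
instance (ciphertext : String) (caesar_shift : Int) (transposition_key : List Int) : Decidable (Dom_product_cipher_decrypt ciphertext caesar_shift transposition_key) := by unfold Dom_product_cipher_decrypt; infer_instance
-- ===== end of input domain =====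

-- B replaces A's column-strings-then-gather pipeline (plus a separate Caesar pass) with one
-- scatter pass writing each character straight to its inverse-permutation destination,
-- decrypting it on the way (objective: alternative decomposition of the same cost).

-- ===== PORT A =====
def caesar_cipher (text : String) (shift : Int) : String :=
  String.ofList (text.toList.foldl (fun result char =>
    if PySem.Chars.isalpha char then
      let shift_base : Int := if PySem.Chars.isupper char then 65 else 97
      result ++ [Char.ofNat (PySem.Int.mod ((char.toNat : Int) - shift_base + shift) 26 + shift_base).toNat]
    else result ++ [char]) [])

def product_cipher_decrypt (ciphertext : String) (caesar_shift : Int) (transposition_key : List Int) : String :=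
  let cs := ciphertext.toList
  let num_cols : Int := transposition_key.length
  let key_indices := PySem.List.sorted (PySem.List.pyRange 0 num_cols 1) (fun k => PySem.List.pyGetD transposition_key k 0) false
  let num_rows := PySem.Int.floordiv cs.length num_cols
  let remainder := PySem.Int.mod cs.length num_cols
  let st := key_indices.foldl (fun (st : List (List Char) × Int) index =>
      let length := if index < remainder then num_rows + 1 else num_rows
      (PySem.List.pySetD st.1 index (PySem.List.slice cs (some st.2) (some (st.2 + length))), st.2 + length))
    (List.replicate transposition_key.length ([] : List Char), 0)
  let transposed_text := (PySem.List.pyRange 0 cs.length 1).map (fun i =>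
      PySem.List.pyGetD (PySem.List.pyGetD st.1 (PySem.Int.mod i num_cols) []) (PySem.Int.floordiv i num_cols) ' ')
  caesar_cipher (String.ofList transposed_text) (-caesar_shift)

-- ===== PORT B =====
def shift_back (ch : Char) (shift : Int) : Char :=
  if PySem.Chars.isupper ch then Char.ofNat (PySem.Int.mod ((ch.toNat : Int) - 65 - shift) 26 + 65).toNat
  else if PySem.Chars.islower ch then Char.ofNat (PySem.Int.mod ((ch.toNat : Int) - 97 - shift) 26 + 97).toNat
  else ch

def product_cipher_decrypt_alt (ciphertext : String) (caesar_shift : Int) (transposition_key : List Int) : String :=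
  let cs := ciphertext.toList
  let num_cols : Int := transposition_key.length
  let num_rows := PySem.Int.floordiv cs.length num_cols
  let remainder := PySem.Int.mod cs.length num_cols
  let st := (PySem.List.sorted (PySem.List.pyRange 0 num_cols 1) (fun k => PySem.List.pyGetD transposition_key k 0) false).foldl
    (fun (st : List (List Char) × Int) index =>
      let length := if index < remainder then num_rows + 1 else num_rows
      ((PySem.List.pyRange 0 length 1).foldl (fun out r =>
          PySem.List.pySetD out (r * num_cols + index)
            [shift_back (PySem.List.pyGetD cs (st.2 + r) ' ') caesar_shift]) st.1,
       st.2 + length))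
    (List.replicate cs.length ([] : List Char), 0)
  String.ofList (PySem.Chars.join [] st.1)

-- ===== PRECONDITION & SPEC =====
-- Pre_ excludes only num_cols == 0 (empty transposition key), where A raises ZeroDivisionError.
def Pre_product_cipher_decrypt (ciphertext : String) (caesar_shift : Int) (transposition_key : List Int) : Prop := transposition_key ≠ []
instance (ciphertext : String) (caesar_shift : Int) (transposition_key : List Int) : Decidable (Pre_product_cipher_decrypt ciphertext caesar_shift transposition_key) := by unfold Pre_product_cipher_decrypt; infer_instance
def pvWitness_product_cipher_decrypt : String × Int × List Int := ("HeolWlrd!o", 3, [2, 0, 1])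

def Spec_product_cipher_decrypt (ciphertext : String) (caesar_shift : Int) (transposition_key : List Int) (out : String) : Prop := out = product_cipher_decrypt_alt ciphertext caesar_shift transposition_key
instance (ciphertext : String) (caesar_shift : Int) (transposition_key : List Int) (out : String) : Decidable (Spec_product_cipher_decrypt ciphertext caesar_shift transposition_key out) := by unfold Spec_product_cipher_decrypt; infer_instance

-- ===== CLAIM (what is proved, stated in full; the proofs are below) =====
def Claim_equal_product_cipher_decrypt : Prop := ∀ (ciphertext : String) (caesar_shift : Int) (transposition_key : List Int), Dom_product_cipher_decrypt ciphertext caesar_shift transposition_key → Pre_product_cipher_decrypt ciphertext caesar_shift transposition_key → Spec_product_cipher_decrypt ciphertext caesar_shift transposition_key (product_cipher_decrypt ciphertext caesar_shift transposition_key)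

-- ===== LEMMAS AND PROOFS =====

-- length of column j in key order (same rule in both programs)
def pvLenN (rows rem j : Nat) : Nat := if j < rem then rows + 1 else rows

-- A's per-character Caesar substitution, isolated
def pvCaesarChar (shift : Int) (char : Char) : Char :=
  if PySem.Chars.isalpha char then
    let shift_base : Int := if PySem.Chars.isupper char then 65 else 97
    Char.ofNat (PySem.Int.mod ((char.toNat : Int) - shift_base + shift) 26 + shift_base).toNat
  else char

theorem pv_caesar_eq_map (ts : List Char) (sh : Int) :
    caesar_cipher (String.ofList ts) sh = String.ofList (ts.map (pvCaesarChar sh)) := by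
  unfold caesar_cipher
  have hstep : (fun (result : List Char) (char : Char) =>
      if PySem.Chars.isalpha char then
        let shift_base : Int := if PySem.Chars.isupper char then 65 else 97
        result ++ [Char.ofNat (PySem.Int.mod ((char.toNat : Int) - shift_base + sh) 26 + shift_base).toNat]
      else result ++ [char])
      = fun result char => result ++ [pvCaesarChar sh char] := by
    funext result char
    unfold pvCaesarChar
    split_ifs <;> rfl
  rw [hstep]
  rw [PySem.List.foldl_append_singleton_eq_map]
  simp

theorem pv_caesarChar_neg (ch : Char) (sh : Int) :
    pvCaesarChar (-sh) ch = shift_back ch sh := by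
  unfold pvCaesarChar shift_back
  have halpha : PySem.Chars.isalpha ch = (PySem.Chars.isupper ch || PySem.Chars.islower ch) := rfl
  by_cases hu : PySem.Chars.isupper ch = true
  · simp [halpha, hu]
    ring_nf
  · by_cases hl : PySem.Chars.islower ch = true
    · simp [halpha, hu, hl]
      ring_nf
    · simp [halpha, hu, hl]

theorem pv_arith_rc (c rows rem p : Nat) (hc : 0 < c) (hrem : rem < c)
    (hp : p < rows * c + rem) : p / c < pvLenN rows rem (p % c) := by
  have hqr : c * (p / c) + p % c = p := Nat.div_add_mod p c
  have hr : p % c < c := Nat.mod_lt _ hc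
  unfold pvLenN
  split_ifs with h
  · by_contra hcon
    push_neg at hcon
    have h2 : (rows + 1) * c ≤ (p / c) * c := Nat.mul_le_mul_right c hcon
    rw [Nat.mul_comm c (p / c)] at hqr
    rw [Nat.add_mul, one_mul] at h2
    have h0 : 0 ≤ p % c := Nat.zero_le _
    linarith
  · by_contra hcon
    push_neg at hcon
    have h2 : rows * c ≤ (p / c) * c := Nat.mul_le_mul_right c hcon
    rw [Nat.mul_comm c (p / c)] at hqr
    linarith

theorem pv_arith_rc' (c rows rem r jn : Nat) (hc : 0 < c) (hjn : jn < c)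
    (hrem : rem ≤ c) (hr : r < pvLenN rows rem jn) : r * c + jn < rows * c + rem := by
  unfold pvLenN at hr
  split_ifs at hr with h
  · have : r ≤ rows := by omega
    nlinarith
  · have : r + 1 ≤ rows := by omega
    nlinarith

theorem pv_sum_lenN (rows rem : Nat) : ∀ c : Nat,
    ((List.range c).map (fun j => pvLenN rows rem j)).sum = c * rows + min rem c := by
  intro c
  induction c with
  | zero => simp
  | succ m ih =>
    rw [List.range_succ, List.map_append, List.sum_append, ih]
    simp only [List.map_cons, List.map_nil, List.sum_cons, List.sum_nil, pvLenN]
    rw [Nat.succ_mul]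
    generalize rows * 1 = a
    split_ifs with h <;> omega

theorem pv_scatter_length {β : Type} (xs : List β) (f : β → Int) (g : β → List Char) :
    ∀ (out : List (List Char)),
    (xs.foldl (fun o b => PySem.List.pySetD o (f b) (g b)) out).length = out.length := by
  induction xs with
  | nil => intro out; rfl
  | cons x xs ih => intro out; rw [List.foldl_cons, ih, PySem.List.length_pySetD]

theorem pv_scatter_char (cs : List Char) (sh : Int) (c j : Nat) (hc : 0 < c) (hj : j < c) :
    ∀ (len : Nat) (s : Nat) (out : List (List Char)),
    (∀ r < len, r * c + j < out.length) →
    ∀ p : Nat,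
    ((PySem.List.pyRange 0 (len : Int) 1).foldl (fun o r =>
        PySem.List.pySetD o (r * (c : Int) + (j : Int))
          [shift_back (PySem.List.pyGetD cs ((s : Int) + r) ' ') sh]) out)[p]?
      = if p % c = j ∧ p / c < len then some [shift_back (cs.getD (s + p / c) ' ') sh]
        else out[p]? := by
  intro len
  induction len with
  | zero =>
    intro s out hw p
    rw [show ((0 : Nat) : Int) = 0 from rfl, PySem.List.pyRange_one_eq_nil (le_refl 0)]
    simp
  | succ m ih =>
    intro s out hw p
    have hcast : ((m + 1 : Nat) : Int) = ((m : Nat) : Int) + 1 := by push_cast; ring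
    rw [hcast, PySem.List.pyRange_one_succ_right (by positivity), List.foldl_append]
    simp only [List.foldl_cons, List.foldl_nil]
    have hidx : ((m : Int) * (c : Int) + (j : Int)) = ((m * c + j : Nat) : Int) := by push_cast; ring
    have hval : ((s : Int) + (m : Int)) = ((s + m : Nat) : Int) := by push_cast; ring
    rw [hidx, hval, PySem.List.pySetD_natCast, PySem.List.pyGetD_natCast]
    have hflen : ((PySem.List.pyRange 0 (m : Int) 1).foldl (fun o r =>
        PySem.List.pySetD o (r * (c : Int) + (j : Int))
          [shift_back (PySem.List.pyGetD cs ((s : Int) + r) ' ') sh]) out).length = out.length :=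
      pv_scatter_length _ _ _ _
    rw [List.getElem?_set]
    by_cases hpm : m * c + j = p
    · have hin : m * c + j < out.length := hw m (Nat.lt_succ_self m) 
      have hpmod : p % c = j := by
        rw [← hpm, Nat.mul_comm m c, Nat.mul_add_mod, Nat.mod_eq_of_lt hj]
      have hpdiv : p / c = m := by
        rw [← hpm, Nat.mul_comm m c, Nat.mul_add_div hc, Nat.div_eq_of_lt hj, Nat.add_zero]
      rw [if_pos hpm, if_pos (by rw [hflen]; exact hpm ▸ hin)]
      rw [if_pos ⟨hpmod, by omega⟩, hpdiv]
    · rw [if_neg hpm, ih s out (fun r hr => hw r (Nat.lt_succ_of_lt hr)) p]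
      have hqr : c * (p / c) + p % c = p := Nat.div_add_mod p c
      by_cases hcond : p % c = j ∧ p / c < m
      · rw [if_pos hcond, if_pos ⟨hcond.1, Nat.lt_succ_of_lt hcond.2⟩]
      · rw [if_neg hcond, if_neg ?_]
        rintro ⟨h1, h2⟩
        have hdm : p / c < m := by
          rcases Nat.lt_succ_iff_lt_or_eq.mp h2 with h | h
          · exact h
          · exfalso; apply hpm; rw [← hqr, h, h1, Nat.mul_comm]
        exact hcond ⟨h1, hdm⟩

theorem pv_fold_inv (cs : List Char) (sh : Int) (c rows rem : Nat) (hc : 0 < c)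
    (hrem : rem < c) (hlen : cs.length = rows * c + rem) :
    ∀ (ks : List Int) (cols out : List (List Char)) (s : Nat),
    (∀ j ∈ ks, ∃ jn : Nat, j = (jn : Int) ∧ jn < c) → ks.Nodup →
    cols.length = c → out.length = cs.length →
    s + (ks.map (fun j => pvLenN rows rem j.toNat)).sum ≤ cs.length →
    (∀ j ∈ ks, cols.getD j.toNat [] = []) →
    (∀ jn : Nat, jn < c → (jn : Int) ∉ ks → (cols.getD jn []).length = pvLenN rows rem jn) →
    (∀ p : Nat, p < cs.length →
        out[p]? = some (((cols.getD (p % c) [])[p / c]?).elim [] (fun ch => [shift_back ch sh]))) →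
    (let A := ks.foldl (fun (st : List (List Char) × Int) index =>
        let length := if index < (rem : Int) then (rows : Int) + 1 else (rows : Int)
        (PySem.List.pySetD st.1 index (PySem.List.slice cs (some st.2) (some (st.2 + length))), st.2 + length))
      (cols, (s : Int));
     let B := ks.foldl (fun (st : List (List Char) × Int) index =>
        let length := if index < (rem : Int) then (rows : Int) + 1 else (rows : Int)
        ((PySem.List.pyRange 0 length 1).foldl (fun o r =>
            PySem.List.pySetD o (r * (c : Int) + index)
              [shift_back (PySem.List.pyGetD cs (st.2 + r) ' ') sh]) st.1,
         st.2 + length))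
      (out, (s : Int));
     A.1.length = c ∧ B.1.length = cs.length ∧
     (∀ jn : Nat, jn < c → ((jn : Int) ∈ ks ∨ (cols.getD jn []).length = pvLenN rows rem jn) →
        (A.1.getD jn []).length = pvLenN rows rem jn) ∧
     (∀ p : Nat, p < cs.length →
        B.1[p]? = some (((A.1.getD (p % c) [])[p / c]?).elim [] (fun ch => [shift_back ch sh])))) := by
  intro ks
  induction ks with
  | nil =>
    intro cols out s hmem hnd hclen holen hsum hI1 hI3 hR
    refine ⟨hclen, holen, ?_, hR⟩
    intro jn hjn hor
    rcases hor with h | h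
    · exact absurd h (List.not_mem_nil)
    · exact h
  | cons jI ks ih =>
    intro cols out s hmem hnd hclen holen hsum hI1 hI3 hR
    obtain ⟨jn, rfl, hjn⟩ := hmem _ List.mem_cons_self
    simp only [List.foldl_cons]
    -- the step's length value
    have hlenI : (if ((jn : Nat) : Int) < (rem : Int) then (rows : Int) + 1 else (rows : Int))
        = ((pvLenN rows rem jn : Nat) : Int) := by
      simp only [pvLenN, Nat.cast_lt]
      split_ifs <;> push_cast <;> ring
    set L := pvLenN rows rem jn with hL
    -- sum bound pieces
    have hsum' : s + L + (ks.map (fun j => pvLenN rows rem j.toNat)).sum ≤ cs.length := by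
      simp only [List.map_cons, List.sum_cons, Int.toNat_natCast] at hsum
      omega
    have hsL : s + L ≤ cs.length := by omega
    -- new states
    have hcast1 : (s : Int) + ((L : Nat) : Int) = ((s + L : Nat) : Int) := by push_cast; ring
    -- beta-reduce the applied step and normalise the new states
    simp only [hlenI, PySem.List.pySetD_natCast, hcast1]
    set csl := PySem.List.slice cs (some (s : Int)) (some ((s + L : Nat) : Int)) with hcsl
    have hslice : csl = (cs.drop s).take L := by
      rw [hcsl, ← hcast1, PySem.List.slice_natCast_add]
    -- facts about the new A-state
    have hjc : jn < cols.length := by rw [hclen]; exact hjn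
    have hslice_len : csl.length = L := by
      rw [hslice, List.length_take, List.length_drop]; omega
    have hgetD_set_self : (cols.set jn csl).getD jn [] = csl := by
      rw [List.getD_eq_getElem?_getD, List.getElem?_set, if_pos rfl, if_pos hjc]; rfl
    have hgetD_set_ne : ∀ m : Nat, m ≠ jn →
        (cols.set jn csl).getD m [] = cols.getD m [] := by
      intro m hm
      rw [List.getD_eq_getElem?_getD, List.getElem?_set, if_neg (fun h => hm h.symm),
        ← List.getD_eq_getElem?_getD]
    have hndtail : (↑jn : Int) ∉ ks := (List.nodup_cons.mp hnd).1
    -- the scatter result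
    have hw : ∀ r < L, r * c + jn < out.length := by
      intro r hr
      rw [holen, hlen]
      exact pv_arith_rc' c rows rem r jn hc hjn (le_of_lt hrem) hr
    have hscat := pv_scatter_char cs sh c jn hc hjn L s out hw
    -- apply the induction hypothesis
    have hih := ih (cols.set jn csl)
      ((PySem.List.pyRange 0 ((L : Nat) : Int) 1).foldl (fun o r =>
          PySem.List.pySetD o (r * (c : Int) + (↑jn : Int))
            [shift_back (PySem.List.pyGetD cs ((s : Int) + r) ' ') sh]) out)
      (s + L)
      (fun j hj => hmem j (List.mem_cons_of_mem _ hj)) (List.nodup_cons.mp hnd).2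
      (by rw [List.length_set, hclen])
      (by rw [pv_scatter_length, holen])
      hsum'
      (by
        intro j hj
        obtain ⟨jn', rfl, hjn'⟩ := hmem j (List.mem_cons_of_mem _ hj)
        rw [Int.toNat_natCast]
        rw [hgetD_set_ne jn' (by rintro rfl; exact hndtail hj)]
        have := hI1 _ (List.mem_cons_of_mem _ hj)
        rwa [Int.toNat_natCast] at this)
      (by
        intro jn' hjn' hnm
        by_cases hjj : jn' = jn
        · subst hjj; rw [hgetD_set_self, hslice_len]
        · rw [hgetD_set_ne jn' hjj]
          exact hI3 jn' hjn' (by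
            intro hmem'
            rcases List.mem_cons.mp hmem' with h | h
            · exact hjj (Nat.cast_injective h)
            · exact hnm h))
      (by
        intro p hp
        rw [hscat p]
        have hpc : p % c < c := Nat.mod_lt _ hc
        by_cases hpm : p % c = jn
        · rw [hpm, hgetD_set_self]
          by_cases hpd : p / c < L
          · rw [if_pos ⟨rfl, hpd⟩]
            have hsp : s + p / c < cs.length := by omega
            have h1 : csl[p / c]? = some cs[s + p / c] := by
              rw [hslice, List.getElem?_take, if_pos hpd, List.getElem?_drop,
                List.getElem?_eq_getElem (by omega)]
            rw [h1]
            simp only [Option.elim]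
            rw [List.getD_eq_getElem cs ' ' hsp]
          · rw [if_neg (by rintro ⟨_, h⟩; exact hpd h)]
            rw [hR p hp, hpm]
            have hcol : cols.getD jn [] = [] := by
              have := hI1 _ (List.mem_cons_self)
              rwa [Int.toNat_natCast] at this
            rw [hcol]
            have h2 : csl[p / c]? = none := by
              rw [List.getElem?_eq_none_iff, hslice_len]; omega
            rw [h2]
            rfl
        · rw [if_neg (by rintro ⟨h, _⟩; exact hpm h)]
          rw [hR p hp, hgetD_set_ne _ hpm])
    obtain ⟨l1, l2, l3, l4⟩ := hih
    refine ⟨l1, l2, ?_, l4⟩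
    intro jn' hjn' hor
    apply l3 jn' hjn'
    rcases hor with h | h
    · rcases List.mem_cons.mp h with h' | h'
      · right
        have : jn' = jn := Nat.cast_injective h'
        subst this
        rw [hgetD_set_self, hslice_len]
      · left; exact h'
    · by_cases hjj : jn' = jn
      · subst hjj; right; rw [hgetD_set_self, hslice_len]
      · right; rw [hgetD_set_ne jn' hjj]; exact h

theorem pv_assemble (cs : List Char) (sh : Int) (c rows rem : Nat) (hc : 0 < c)
    (hrem : rem < c) (hlen : cs.length = rows * c + rem)
    (AC BC : List (List Char)) (hBlen : BC.length = cs.length)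
    (hAcols : ∀ p : Nat, p < cs.length → (AC.getD (p % c) []).length = pvLenN rows rem (p % c))
    (hR : ∀ p : Nat, p < cs.length →
        BC[p]? = some (((AC.getD (p % c) [])[p / c]?).elim [] (fun ch => [shift_back ch sh]))) :
    String.ofList (((PySem.List.pyRange 0 (cs.length : Int) 1).map (fun i =>
        PySem.List.pyGetD (PySem.List.pyGetD AC (PySem.Int.mod i (c : Int)) [])
          (PySem.Int.floordiv i (c : Int)) ' ')).map (pvCaesarChar (-sh)))
      = String.ofList (PySem.Chars.join [] BC) := by
  have hFin : ∀ p : Nat, p < cs.length → p / c < (AC.getD (p % c) []).length := by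
    intro p hp
    rw [hAcols p hp]
    exact pv_arith_rc c rows rem p hc hrem (by omega)
  have hFval : ∀ p : Nat, (hp : p < cs.length) →
      (AC.getD (p % c) [])[p / c]? = some ((AC.getD (p % c) []).getD (p / c) ' ') := by
    intro p hp
    rw [List.getElem?_eq_getElem (hFin p hp), List.getD_eq_getElem _ _ (hFin p hp)]
  have hBC : BC = (List.range cs.length).map
      (fun p => [shift_back ((AC.getD (p % c) []).getD (p / c) ' ') sh]) := by
    apply List.ext_getElem?
    intro p
    by_cases hp : p < cs.length
    · rw [hR p hp, hFval p hp, List.getElem?_map, List.getElem?_range hp]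
      rfl
    · rw [List.getElem?_eq_none_iff.mpr (by rw [hBlen]; omega),
        List.getElem?_eq_none_iff.mpr (by rw [List.length_map, List.length_range]; omega)]
  rw [hBC]
  have hsing : (List.range cs.length).map
      (fun p => [shift_back ((AC.getD (p % c) []).getD (p / c) ' ') sh])
      = ((List.range cs.length).map
          (fun p => shift_back ((AC.getD (p % c) []).getD (p / c) ' ') sh)).map (fun ch => [ch]) := by
    rw [List.map_map]; rfl
  rw [hsing, PySem.Chars.join_nil_singletons]
  congr 1
  rw [PySem.List.pyRange_zero_nat, List.map_map, List.map_map]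
  apply List.map_congr_left
  intro p hp
  rw [List.mem_range] at hp
  simp only [Function.comp]
  rw [PySem.Int.mod_natCast, PySem.Int.floordiv_natCast,
    PySem.List.pyGetD_natCast, PySem.List.pyGetD_natCast]
  exact pv_caesarChar_neg _ sh

theorem pv_main (ciphertext : String) (caesar_shift : Int) (transposition_key : List Int)
    (hpre : transposition_key ≠ []) :
    product_cipher_decrypt ciphertext caesar_shift transposition_key
      = product_cipher_decrypt_alt ciphertext caesar_shift transposition_key := by
  have hc : 0 < transposition_key.length := List.length_pos_iff.mpr hpre
  set cs := ciphertext.toList with hcs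
  set c := transposition_key.length with hcdef
  set n := cs.length with hndef
  set rows := n / c with hrows
  set rem := n % c with hrem0
  have hrem : rem < c := Nat.mod_lt _ hc
  have hlen : n = rows * c + rem := by
    rw [hrows, hrem0, Nat.mul_comm, Nat.div_add_mod]
  -- the sorted key order
  set ks := PySem.List.sorted (PySem.List.pyRange 0 (c : Int) 1)
    (fun k => PySem.List.pyGetD transposition_key k 0) false with hks
  have hperm : ks.Perm (PySem.List.pyRange 0 (c : Int) 1) := PySem.List.sorted_perm _ _ _
  have hmem : ∀ j ∈ ks, ∃ jn : Nat, j = (jn : Int) ∧ jn < c := by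
    intro j hj
    have := PySem.List.mem_pyRange_one.mp (hperm.mem_iff.mp hj)
    exact ⟨j.toNat, by omega, by omega⟩
  have hnd : ks.Nodup := hperm.nodup_iff.mpr (PySem.List.nodup_pyRange_one 0 (c : Int))
  have hmemc : ∀ jn : Nat, jn < c → (jn : Int) ∈ ks := by
    intro jn hjn
    exact hperm.mem_iff.mpr (PySem.List.mem_pyRange_one.mpr ⟨by positivity, by exact_mod_cast hjn⟩)
  have hsum : 0 + (ks.map (fun j => pvLenN rows rem j.toNat)).sum ≤ n := by
    rw [Nat.zero_add, (hperm.map _).sum_eq]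
    rw [show ((c : Nat) : Int) = ((c : Nat) : Int) from rfl, PySem.List.pyRange_zero_nat, List.map_map]
    have : ((fun j => pvLenN rows rem j.toNat) ∘ fun k => ((k : Nat) : Int)) = fun j => pvLenN rows rem j := by
      funext j; simp
    rw [this, pv_sum_lenN, Nat.min_eq_left (Nat.le_of_lt hrem), Nat.mul_comm]
    omega
  have hfold := pv_fold_inv cs caesar_shift c rows rem hc hrem hlen ks
    (List.replicate c []) (List.replicate n []) 0
    hmem hnd (List.length_replicate) (List.length_replicate)
    hsum
    (by
      intro j hj
      obtain ⟨jn, rfl, hjn⟩ := hmem j hj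
      rw [Int.toNat_natCast]
      exact List.getD_replicate _ hjn)
    (by intro jn hjn hnm; exact absurd (hmemc jn hjn) hnm)
    (by
      intro p hp
      have h1 : (List.replicate n ([] : List Char))[p]? = some [] := by
        rw [List.getElem?_eq_getElem (by simpa using hp)]
        simp
      rw [h1, List.getD_replicate _ (Nat.mod_lt _ hc)]
      rfl)
  simp only [Nat.cast_zero] at hfold
  obtain ⟨hAlen, hBlen, hAcols, hR⟩ := hfold
  -- unfold the two ports
  unfold product_cipher_decrypt product_cipher_decrypt_alt
  simp only [PySem.Int.floordiv_natCast, PySem.Int.mod_natCast]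
  rw [pv_caesar_eq_map]
  exact pv_assemble cs caesar_shift c rows rem hc hrem hlen _ _ hBlen
    (fun p hp => hAcols (p % c) (Nat.mod_lt _ hc) (Or.inl (hmemc _ (Nat.mod_lt _ hc))))
    hR


-- ===== VERDICT (by name: the statement is the Claim_ definition above) =====
theorem product_cipher_decrypt_spec : Claim_equal_product_cipher_decrypt := by
  intro ciphertext caesar_shift transposition_key _ hpre
  exact pv_main ciphertext caesar_shift transposition_key hpre
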